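-- pv_equiv track=rewrite | github.com/dacacioa/cw-keyer-trainer | core/qso_state_machine.py | _collapse_double_e
-- ===== SOURCE A (Python) =====
-- from typing import Dict, List, Mapping, Optional, Sequence, Tuple
--
-- def _collapse_double_e(tokens: Sequence[str]) -> List[str]:
--     out: List[str] = []
--     i = 0
--     while i < len(tokens):
--         if i + 1 < len(tokens) and tokens[i] == "E" and tokens[i + 1] == "E":
--             out.append("EE")
--             i += 2
--             continue
--         out.append(tokens[i])
--         i += 1
--     return out
-- ===== SOURCE B (Python) =====
-- from typing import List, Sequence
--
-- def _collapse_double_e(tokens: Sequence[str]) -> List[str]: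
--     out: List[str] = []
--     pending = False
--     for t in tokens:
--         if t == "E":
--             if pending:
--                 out.append("EE")
--                 pending = False
--             else:
--                 pending = True
--         else:
--             if pending:
--                 out.append("E")
--                 pending = False
--             out.append(t)
--     if pending:
--         out.append("E")
--     return out
-- ===== Notes on version B (the rewrite author's own statement) =====
-- stated objective: alternative
-- what changed: Replaced the index-jumping lookahead loop (i += 2 on a merge, with repeated len() and indexed access) by a single for-loop lookbehind state machine carrying a pending-'E' flag, with a final flush.
import Mathlib
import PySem

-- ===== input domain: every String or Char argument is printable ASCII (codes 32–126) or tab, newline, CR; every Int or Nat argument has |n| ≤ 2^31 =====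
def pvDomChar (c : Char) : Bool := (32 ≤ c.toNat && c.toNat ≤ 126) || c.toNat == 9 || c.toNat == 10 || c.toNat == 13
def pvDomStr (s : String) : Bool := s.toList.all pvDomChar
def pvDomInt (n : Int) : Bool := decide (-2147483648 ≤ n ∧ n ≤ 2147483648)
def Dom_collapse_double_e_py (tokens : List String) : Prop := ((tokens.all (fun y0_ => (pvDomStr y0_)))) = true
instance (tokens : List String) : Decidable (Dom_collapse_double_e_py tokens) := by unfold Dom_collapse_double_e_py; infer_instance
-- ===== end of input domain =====

-- B: lookbehind state machine with a pending-'E' flag instead of A's index-jump lookahead (alternative decomposition, same cost).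

-- ===== PORT A =====
def collapse_double_e_py : List String → List String
  | [] => []
  | [x] => [x]
  | x :: y :: rest =>
      if x = "E" ∧ y = "E" then "EE" :: collapse_double_e_py rest
      else x :: collapse_double_e_py (y :: rest)

-- ===== PORT B =====
-- one step of B's for-loop: state = (out, pending-'E' flag)
def altStep (st : List String × Bool) (t : String) : List String × Bool :=
  if t = "E" then
    if st.2 then (st.1 ++ ["EE"], false) else (st.1, true)
  else
    if st.2 then (st.1 ++ ["E"] ++ [t], false) else (st.1 ++ [t], false)

def collapse_double_e_py_alt (tokens : List String) : List String :=
  let st := tokens.foldl altStep ([], false)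
  if st.2 then st.1 ++ ["E"] else st.1

-- ===== PRECONDITION & SPEC =====
def Spec_collapse_double_e_py (tokens : List String) (out : List String) : Prop := out = collapse_double_e_py_alt tokens
instance (tokens : List String) (out : List String) : Decidable (Spec_collapse_double_e_py tokens out) := by unfold Spec_collapse_double_e_py; infer_instance

-- ===== CLAIM (what is proved, stated in full; the proofs are below) =====
def Claim_equal_collapse_double_e_py : Prop := ∀ (tokens : List String), Dom_collapse_double_e_py tokens → Spec_collapse_double_e_py tokens (collapse_double_e_py tokens)

-- ===== LEMMAS AND PROOFS =====

-- ===== VERDICT (by name: the statement is the Claim_ definition above) =====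
-- flush of the loop state, used only to state the invariant
def altFinish (st : List String × Bool) : List String :=
  if st.2 then st.1 ++ ["E"] else st.1

theorem key (tokens : List String) : ∀ (acc : List String),
    altFinish (tokens.foldl altStep (acc, false)) = acc ++ collapse_double_e_py tokens := by
  induction tokens using collapse_double_e_py.induct with
  | case1 => intro acc; simp [altFinish, collapse_double_e_py]
  | case2 x =>
      intro acc
      by_cases hx : x = "E" <;>
        simp [altFinish, altStep, collapse_double_e_py, hx]
  | case3 x y rest h ih =>
      intro acc
      obtain ⟨hx, hy⟩ := h
      simp [List.foldl, altStep, hx, hy, collapse_double_e_py, ih]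
  | case4 x y rest h ih =>
      intro acc
      by_cases hx : x = "E"
      · have hy : y ≠ "E" := fun hy => h ⟨hx, hy⟩
        have step : List.foldl altStep (acc, false) (x :: y :: rest)
            = List.foldl altStep (acc, true) (y :: rest) := by
          simp [List.foldl, altStep, hx]
        have step2 : List.foldl altStep (acc, true) (y :: rest)
            = List.foldl altStep (acc ++ ["E"], false) (y :: rest) := by
          simp [List.foldl, altStep, hy]
        rw [step, step2, ih, collapse_double_e_py]
        simp [hx, hy]
      · have step : List.foldl altStep (acc, false) (x :: y :: rest)
            = List.foldl altStep (acc ++ [x], false) (y :: rest) := by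
          simp [List.foldl, altStep, hx]
        rw [step, ih, collapse_double_e_py]
        simp [h]

theorem collapse_double_e_py_spec : Claim_equal_collapse_double_e_py := by
  intro tokens _
  unfold Spec_collapse_double_e_py collapse_double_e_py_alt
  have := key tokens []
  simp [altFinish] at this
  simp [← this]
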